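-- pv_equiv track=rewrite | github.com/sshashaa/astro-df | rng/TheYunsooOne.py | find_turn
-- ===== SOURCE A (Python) =====
-- def find_turn(roadcombo):
--     turnkey = {'Straight': ['WestWest', 'EastEast', 'SouthSouth', 'NorthNorth'],
--                'Left': ['NorthWest', 'EastNorth', 'SouthEast', 'WestSouth'],
--                'Right': ['NorthEast', 'WestNorth', 'SouthWest', 'EastSouth']
--                }
--     turn = ''
--     for key, values in turnkey.items():
--         for value in values:
--             if roadcombo == value:
--                 turn = key
--     return turn
-- ===== SOURCE B (Python) =====
-- def find_turn(roadcombo):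
--     # Compass arithmetic: each direction is a quarter-turn angle; the turn type
--     # is determined by (angle(out) - angle(in)) mod 4 (0=Straight, 1=Right, 3=Left,
--     # 2=U-turn, which the table does not name, hence '').
--     angle = {'North': 0, 'East': 1, 'South': 2, 'West': 3}
--     turns = ('Straight', 'Right', '', 'Left')
--     for d, a in angle.items():
--         if roadcombo.startswith(d):
--             rest = roadcombo[len(d):]
--             if rest in angle:
--                 return turns[(angle[rest] - a) % 4]
--     return ''
-- ===== Notes on version B (the rewrite author's own statement) =====
-- stated objective: alternative
-- what changed: Replaces the 12-entry table scan with compass arithmetic: the string is parsed into its two directions, each mapped to a quarter-turn angle, and the turn is computed as (out-in) mod 4, so no turn table exists at all.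
import Mathlib
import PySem

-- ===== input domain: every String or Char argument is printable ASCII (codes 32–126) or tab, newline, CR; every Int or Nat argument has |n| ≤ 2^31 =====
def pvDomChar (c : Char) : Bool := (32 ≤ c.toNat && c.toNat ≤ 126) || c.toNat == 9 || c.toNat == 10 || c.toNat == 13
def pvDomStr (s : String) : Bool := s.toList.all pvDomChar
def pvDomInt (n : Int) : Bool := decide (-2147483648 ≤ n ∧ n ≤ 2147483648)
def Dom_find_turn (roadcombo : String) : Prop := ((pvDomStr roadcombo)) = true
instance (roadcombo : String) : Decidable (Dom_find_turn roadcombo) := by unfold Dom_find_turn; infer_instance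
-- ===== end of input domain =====

-- B replaces A's turn table and its nested scan by compass arithmetic: parse the two
-- directions and compute the turn as (angle(out) - angle(in)) mod 4 (alternative; no mutation involved).

-- ===== PORT A =====
def turnkeyA : List (String × List String) :=
  [("Straight", ["WestWest", "EastEast", "SouthSouth", "NorthNorth"]),
   ("Left", ["NorthWest", "EastNorth", "SouthEast", "WestSouth"]),
   ("Right", ["NorthEast", "WestNorth", "SouthWest", "EastSouth"])]

def find_turn (roadcombo : String) : String :=
  turnkeyA.foldl
    (fun turn kv =>
      kv.2.foldl (fun t v => if roadcombo == v then kv.1 else t) turn)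
    ""

-- ===== PORT B =====
def angleAlt : PySem.Dict String Int :=
  PySem.Dict.ofList [("North", 0), ("East", 1), ("South", 2), ("West", 3)]

def turnsAlt : List String := ["Straight", "Right", "", "Left"]

-- the for-loop over angle.items() with its early return, as structural recursion
def findTurnGo (roadcombo : String) : List (String × Int) → String
  | [] => ""
  | (d, a) :: items =>
    if PySem.Str.startswith roadcombo d then
      let rest := PySem.Str.slice roadcombo (some (PySem.Str.len d)) none
      if angleAlt.contains rest then
        -- turns[(angle[rest] - a) % 4]; the index is mod 4 of an in-keys lookup, always in range
        (PySem.List.pyGet? turnsAlt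
            (PySem.Int.mod ((angleAlt.get? rest).getD 0 - a) 4)).getD ""
      else findTurnGo roadcombo items
    else findTurnGo roadcombo items

def find_turn_alt (roadcombo : String) : String :=
  findTurnGo roadcombo angleAlt.items

-- ===== PRECONDITION & SPEC =====
def Spec_find_turn (roadcombo : String) (out : String) : Prop := out = find_turn_alt roadcombo
instance (roadcombo : String) (out : String) : Decidable (Spec_find_turn roadcombo out) := by unfold Spec_find_turn; infer_instance

-- ===== CLAIM (what is proved, stated in full; the proofs are below) =====
def Claim_equal_find_turn : Prop := ∀ (roadcombo : String), Dom_find_turn roadcombo → Spec_find_turn roadcombo (find_turn roadcombo)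

-- ===== LEMMAS AND PROOFS =====

-- the sixteen two-direction concatenations; outside them both programs return ""
def pvCombos : List String :=
  ["NorthNorth", "NorthEast", "NorthSouth", "NorthWest",
   "EastNorth", "EastEast", "EastSouth", "EastWest",
   "SouthNorth", "SouthEast", "SouthSouth", "SouthWest",
   "WestNorth", "WestEast", "WestSouth", "WestWest"]

theorem contains_false (r : String) (h1 : r ≠ "North") (h2 : r ≠ "East")
    (h3 : r ≠ "South") (h4 : r ≠ "West") : angleAlt.contains r = false := by
  have hAlt : angleAlt = PySem.Dict.mk [("North", (0:Int)), ("East", 1), ("South", 2), ("West", 3)] := by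
    decide
  rw [hAlt]
  simp
  exact ⟨Ne.symm h1, Ne.symm h2, Ne.symm h3, Ne.symm h4⟩

theorem rest_toList (s d : String) (t : List Char) (ht : d.toList ++ t = s.toList) :
    (PySem.Str.slice s (some (PySem.Str.len d)) none).toList = t := by
  simp [PySem.Str.toList_slice, PySem.Str.len_eq, PySem.List.slice_from_natCast, ← ht]

theorem iter_skip (s d : String) (a : Int) (items : List (String × Int))
    (h : PySem.Str.startswith s d = false) :
    findTurnGo s ((d, a) :: items) = findTurnGo s items := by
  simp only [findTurnGo, h, Bool.false_eq_true, if_false]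

-- if s starts with d but its remainder is not a direction, the iteration for d falls through
theorem iter_fallthrough (s d : String) (a : Int) (items : List (String × Int))
    (t : List Char) (ht : d.toList ++ t = s.toList)
    (hne : ∀ r ∈ (["North", "East", "South", "West"] : List String), s.toList ≠ d.toList ++ r.toList) :
    findTurnGo s ((d, a) :: items) = findTurnGo s items := by
  have hpre : PySem.Str.startswith s d = true := by
    rw [PySem.Str.startswith_eq, PySem.Chars.startswith_iff]
    exact ⟨t, ht⟩
  have hrest := rest_toList s d t ht
  have hcon : angleAlt.contains (PySem.Str.slice s (some (PySem.Str.len d)) none) = false := by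
    apply contains_false
    · intro he; exact hne "North" (by simp) (by rw [← ht, ← hrest, he])
    · intro he; exact hne "East" (by simp) (by rw [← ht, ← hrest, he])
    · intro he; exact hne "South" (by simp) (by rw [← ht, ← hrest, he])
    · intro he; exact hne "West" (by simp) (by rw [← ht, ← hrest, he])
  simp only [findTurnGo, hpre, if_true, hcon, Bool.false_eq_true, if_false]

theorem alt_default (s : String) (h : ∀ t ∈ pvCombos, s ≠ t) : find_turn_alt s = "" := by
  have hitems : angleAlt.items =
      [("North", (0:Int)), ("East", 1), ("South", 2), ("West", 3)] := by decide
  have hne : ∀ (d : String), (∀ r ∈ (["North", "East", "South", "West"] : List String),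
      String.ofList (d.toList ++ r.toList) ∈ pvCombos) →
      ∀ r ∈ (["North", "East", "South", "West"] : List String), s.toList ≠ d.toList ++ r.toList := by
    intro d hd r hr he
    exact h _ (hd r hr) (String.toList_inj.mp (by rw [he]; simp))
  unfold find_turn_alt
  rw [hitems]
  by_cases hN : PySem.Str.startswith s "North" = true
  · obtain ⟨t, ht⟩ : "North".toList <+: s.toList := by
      rw [PySem.Str.startswith_eq, PySem.Chars.startswith_iff] at hN; exact hN
    have hE : PySem.Str.startswith s "East" = false := by
      simp [PySem.Str.startswith_eq, ← ht, PySem.Chars.startswith, List.isPrefixOf]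
    have hS : PySem.Str.startswith s "South" = false := by
      simp [PySem.Str.startswith_eq, ← ht, PySem.Chars.startswith, List.isPrefixOf]
    have hW : PySem.Str.startswith s "West" = false := by
      simp [PySem.Str.startswith_eq, ← ht, PySem.Chars.startswith, List.isPrefixOf]
    rw [iter_fallthrough s "North" 0 _ t ht (hne "North" (by decide)),
      iter_skip s "East" 1 _ hE, iter_skip s "South" 2 _ hS, iter_skip s "West" 3 _ hW]; rfl
  · rw [iter_skip s "North" 0 _ (by simpa using hN)]
    by_cases hE : PySem.Str.startswith s "East" = true
    · obtain ⟨t, ht⟩ : "East".toList <+: s.toList := by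
        rw [PySem.Str.startswith_eq, PySem.Chars.startswith_iff] at hE; exact hE
      have hS : PySem.Str.startswith s "South" = false := by
        simp [PySem.Str.startswith_eq, ← ht, PySem.Chars.startswith, List.isPrefixOf]
      have hW : PySem.Str.startswith s "West" = false := by
        simp [PySem.Str.startswith_eq, ← ht, PySem.Chars.startswith, List.isPrefixOf]
      rw [iter_fallthrough s "East" 1 _ t ht (hne "East" (by decide)),
        iter_skip s "South" 2 _ hS, iter_skip s "West" 3 _ hW]; rfl
    · rw [iter_skip s "East" 1 _ (by simpa using hE)]
      by_cases hS : PySem.Str.startswith s "South" = true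
      · obtain ⟨t, ht⟩ : "South".toList <+: s.toList := by
          rw [PySem.Str.startswith_eq, PySem.Chars.startswith_iff] at hS; exact hS
        have hW : PySem.Str.startswith s "West" = false := by
          simp [PySem.Str.startswith_eq, ← ht, PySem.Chars.startswith, List.isPrefixOf]
        rw [iter_fallthrough s "South" 2 _ t ht (hne "South" (by decide)),
          iter_skip s "West" 3 _ hW]; rfl
      · rw [iter_skip s "South" 2 _ (by simpa using hS)]
        by_cases hW : PySem.Str.startswith s "West" = true
        · obtain ⟨t, ht⟩ : "West".toList <+: s.toList := by
            rw [PySem.Str.startswith_eq, PySem.Chars.startswith_iff] at hW; exact hW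
          rw [iter_fallthrough s "West" 3 _ t ht (hne "West" (by decide))]; rfl
        · rw [iter_skip s "West" 3 _ (by simpa using hW)]; rfl

theorem a_default (s : String) (h : ∀ t ∈ pvCombos, s ≠ t) : find_turn s = "" := by
  have h1 : s ≠ "WestWest" := h _ (by decide)
  have h2 : s ≠ "EastEast" := h _ (by decide)
  have h3 : s ≠ "SouthSouth" := h _ (by decide)
  have h4 : s ≠ "NorthNorth" := h _ (by decide)
  have h5 : s ≠ "NorthWest" := h _ (by decide)
  have h6 : s ≠ "EastNorth" := h _ (by decide)
  have h7 : s ≠ "SouthEast" := h _ (by decide)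
  have h8 : s ≠ "WestSouth" := h _ (by decide)
  have h9 : s ≠ "NorthEast" := h _ (by decide)
  have h10 : s ≠ "WestNorth" := h _ (by decide)
  have h11 : s ≠ "SouthWest" := h _ (by decide)
  have h12 : s ≠ "EastSouth" := h _ (by decide)
  simp [find_turn, turnkeyA, h1, h2, h3, h4, h5, h6, h7, h8, h9, h10, h11, h12]

-- ===== VERDICT (by name: the statement is the Claim_ definition above) =====
theorem find_turn_spec : Claim_equal_find_turn := by
  intro s _
  unfold Spec_find_turn
  by_cases hc : s ∈ pvCombos
  · fin_cases hc <;> rfl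
  · rw [a_default s (fun t ht he => hc (he ▸ ht)),
      alt_default s (fun t ht he => hc (he ▸ ht))]
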